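-- pv_equiv track=rewrite | github.com/monzag/python-lightweight-erp-project-pylamas | crm/crm.py | get_longest_name_id
-- ===== SOURCE A (Python) =====
-- def get_longest_name_id(table):
--     '''
--     Compare length of names in the table and get id the longest name.
--     If there are more than one longest name, return the first by 'asscending' alphabetical order
--
--     Args:
--         table - list in lists where is find element with index 1 (name)
--
--     Returns:
--         Id of longest name
--
--     '''
--     longest_name = ''
--     id_longest_name = ''
--     index_name = 1
--     index_id = 0
--
--     for row in table:
--         name = row[index_name].lower()
--         id_ = row[index_id]
--
--         if len(name) > len(longest_name):
--             longest_name = name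
--             id_longest_name = id_
--
--         elif len(name) == len(longest_name):
--             longest_name = min(name, longest_name)
--             if longest_name == name:
--                 id_longest_name = id_
--
--     return id_longest_name
-- ===== SOURCE B (Python) =====
-- def get_longest_name_id(table):
--     '''Staged pipeline instead of an online selection loop: lowercase the names,
--     take the maximum length, filter the longest ones, take the minimal name
--     alphabetically, and return the id of the last row carrying it.'''
--     names = [(row[1].lower(), row[0]) for row in table]
--     if not names:
--         return ''
--     max_len = max(len(n) for n, _ in names)
--     longest = [(n, i) for n, i in names if len(n) == max_len]
--     best = min(n for n, _ in longest)
--     return [i for n, i in longest if n == best][-1]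
-- ===== Notes on version B (the rewrite author's own statement) =====
-- stated objective: alternative
-- what changed: Replaces A's single online loop over two mutable accumulators by a staged pipeline (lowercase names, max length, filter the longest, min name, last matching id); same result including last-row-wins on exactly-equal names.
import Mathlib
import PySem

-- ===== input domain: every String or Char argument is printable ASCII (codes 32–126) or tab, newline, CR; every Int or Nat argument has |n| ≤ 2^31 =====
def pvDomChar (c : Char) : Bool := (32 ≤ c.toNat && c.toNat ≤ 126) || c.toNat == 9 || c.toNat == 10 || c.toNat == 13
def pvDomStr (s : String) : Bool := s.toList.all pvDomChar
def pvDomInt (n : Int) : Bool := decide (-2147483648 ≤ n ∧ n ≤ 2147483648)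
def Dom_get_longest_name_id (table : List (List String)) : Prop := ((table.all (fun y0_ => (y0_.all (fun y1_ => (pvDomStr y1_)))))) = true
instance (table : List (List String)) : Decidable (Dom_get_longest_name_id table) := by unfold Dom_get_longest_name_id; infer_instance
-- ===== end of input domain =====

-- B replaces A's single accumulator loop by a staged pipeline (max length, filter, min, last); same result.
-- Pre_ excludes tables with a row of fewer than 2 cells, on which the Python A raises IndexError.


-- ===== PORT A =====
-- Literal transliteration of A's loop over the two accumulators (longest_name, id_longest_name).
-- pyGetD defaults stand for row[1]/row[0]; inside Pre_ they are never used.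
def aStep (acc : String × String) (row : List String) : String × String :=
  let name := PySem.Str.lower (PySem.List.pyGetD row 1 "")
  let id_ := PySem.List.pyGetD row 0 ""
  if acc.1.length < name.length then (name, id_)
  else if name.length = acc.1.length then
    -- longest_name = min(name, longest_name); if longest_name == name: id updated
    let ln := if name ≤ acc.1 then name else acc.1
    if ln = name then (ln, id_) else (ln, acc.2)
  else acc

def get_longest_name_id (table : List (List String)) : String :=
  (table.foldl aStep ("", "")).2

-- ===== PORT B =====
-- Transliteration of Source B's staged pipeline; fmin is the port of Python's min() over strings
-- (first element, then a running minimum keeping the first minimal one).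
def fmin : List String → String
  | [] => ""
  | n :: ns => ns.foldl (fun m x => if x < m then x else m) n

def get_longest_name_id_alt (table : List (List String)) : String :=
  let names := table.map (fun row => (PySem.Str.lower (PySem.List.pyGetD row 1 ""), PySem.List.pyGetD row 0 ""))
  match names with
  | [] => ""
  | p :: rest =>
    -- max(len(n) for n,_ in names): first element then running max
    let maxLen := rest.foldl (fun m q => max m q.1.length) p.1.length
    let longest := (p :: rest).filter (fun q => q.1.length == maxLen)
    -- min(n for n,_ in longest): "" default unreachable, longest is nonempty
    let best := fmin (longest.map Prod.fst)
    PySem.List.pyGetD ((longest.filter (fun q => q.1 == best)).map Prod.snd) (-1) ""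

-- ===== PRECONDITION & SPEC =====
-- Pre_ excludes exactly the tables containing a row with fewer than 2 cells, on which A raises IndexError (row[1]).
def Pre_get_longest_name_id (table : List (List String)) : Prop :=
  ∀ row ∈ table, 2 ≤ row.length
instance (table : List (List String)) : Decidable (Pre_get_longest_name_id table) := by
  unfold Pre_get_longest_name_id; infer_instance
def pvWitness_get_longest_name_id : List (List String) := [["1", "Ann"], ["2", "Bo"]]
def Spec_get_longest_name_id (table : List (List String)) (out : String) : Prop := out = get_longest_name_id_alt table
instance (table : List (List String)) (out : String) : Decidable (Spec_get_longest_name_id table out) := by unfold Spec_get_longest_name_id; infer_instance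

-- ===== CLAIM (what is proved, stated in full; the proofs are below) =====
def Claim_equal_get_longest_name_id : Prop := ∀ (table : List (List String)), Dom_get_longest_name_id table → Pre_get_longest_name_id table → Spec_get_longest_name_id table (get_longest_name_id table)

-- ===== LEMMAS AND PROOFS =====

-- A's step expressed on (loweredName, id) pairs
def pstep (acc q : String × String) : String × String :=
  if acc.1.length < q.1.length then q
  else if q.1.length = acc.1.length ∧ q.1 ≤ acc.1 then q else acc

def rowPair (row : List String) : String × String :=
  (PySem.Str.lower (PySem.List.pyGetD row 1 ""), PySem.List.pyGetD row 0 "")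

-- B's stages as named functions of (first pair, remaining pairs)
def maxLenOf (p : String × String) (rest : List (String × String)) : Nat :=
  rest.foldl (fun m q => max m q.1.length) p.1.length

def longestOf (p : String × String) (rest : List (String × String)) : List (String × String) :=
  (p :: rest).filter (fun q => q.1.length == maxLenOf p rest)

def selPair (p : String × String) (rest : List (String × String)) : String × String :=
  let best := fmin ((longestOf p rest).map Prod.fst)
  (best, PySem.List.pyGetD (((longestOf p rest).filter (fun q => q.1 == best)).map Prod.snd) (-1) "")

lemma aStep_eq_pstep (acc : String × String) (row : List String) :
    aStep acc row = pstep acc (rowPair row) := by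
  simp only [aStep, pstep, rowPair]
  by_cases h1 : acc.1.length < (PySem.Str.lower (PySem.List.pyGetD row 1 "")).length
  · simp [h1]
  · by_cases h2 : (PySem.Str.lower (PySem.List.pyGetD row 1 "")).length = acc.1.length
    · by_cases h3 : PySem.Str.lower (PySem.List.pyGetD row 1 "") ≤ acc.1
      · simp [h2, h3]
      · have hne : acc.1 ≠ PySem.Str.lower (PySem.List.pyGetD row 1 "") := by
          intro he; exact h3 (le_of_eq he.symm)
        simp [h2, h3, hne]
    · simp [h1, h2]

lemma pstep_init (p : String × String) : pstep ("", "") p = p := by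
  simp only [pstep]
  by_cases h : (0:Nat) < p.1.length
  · simp [h]
  · have hl : p.1.length = 0 := by omega
    have he : p.1 = "" := String.length_eq_zero_iff.mp hl
    simp [he]

-- min-fold: the result is a member of the list
lemma fminFold_mem (ns : List String) (n : String) :
    ns.foldl (fun m x => if x < m then x else m) n ∈ n :: ns := by
  induction ns generalizing n with
  | nil => exact List.mem_cons_self
  | cons x xs ih =>
    simp only [List.foldl_cons]
    by_cases h : x < n
    · rw [if_pos h]
      rcases List.mem_cons.mp (ih x) with h' | h'
      · rw [h']; exact List.mem_cons.mpr (Or.inr List.mem_cons_self)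
      · exact List.mem_cons.mpr (Or.inr (List.mem_cons.mpr (Or.inr h')))
    · rw [if_neg h]
      rcases List.mem_cons.mp (ih n) with h' | h'
      · rw [h']; exact List.mem_cons_self
      · exact List.mem_cons.mpr (Or.inr (List.mem_cons.mpr (Or.inr h')))

lemma maxLenOf_bound (p : String × String) (rest : List (String × String))
    (x : String × String) (hx : x ∈ p :: rest) : x.1.length ≤ maxLenOf p rest := by
  unfold maxLenOf
  rcases List.mem_cons.mp hx with h | h
  · subst h; exact (PySem.List.le_foldl_max_nat rest (fun q => q.1.length) x.1.length).1
  · exact (PySem.List.le_foldl_max_nat rest (fun q => q.1.length) p.1.length).2 x h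

lemma maxLenOf_attained (p : String × String) (rest : List (String × String)) :
    ∃ x ∈ p :: rest, x.1.length = maxLenOf p rest := by
  unfold maxLenOf
  have : rest.foldl (fun m q => max m q.1.length) p.1.length
      = (rest.map (fun q => q.1.length)).foldl max p.1.length := by
    rw [List.foldl_map]
  rw [this]
  rcases PySem.List.foldl_max_mem (rest.map (fun q => q.1.length)) p.1.length with h | h
  · exact ⟨p, by simp, h.symm⟩
  · rcases List.mem_map.mp h with ⟨x, hx, he⟩
    exact ⟨x, by simp [hx], he⟩

lemma longestOf_ne_nil (p : String × String) (rest : List (String × String)) :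
    longestOf p rest ≠ [] := by
  rcases maxLenOf_attained p rest with ⟨x, hx, he⟩
  have : x ∈ longestOf p rest := by
    unfold longestOf; exact List.mem_filter.mpr ⟨hx, by simp [he]⟩
  intro h; rw [h] at this; exact (List.not_mem_nil) this

lemma fmin_mem (l : List String) (h : l ≠ []) : fmin l ∈ l := by
  cases l with
  | nil => exact absurd rfl h
  | cons n ns => exact fminFold_mem ns n

-- the selected best name has exactly the maximal length
lemma selPair_fst_length (p : String × String) (rest : List (String × String)) :
    (selPair p rest).1.length = maxLenOf p rest := by
  have hne : (longestOf p rest).map Prod.fst ≠ [] := by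
    intro h
    exact longestOf_ne_nil p rest (List.map_eq_nil_iff.mp h)
  have hmem := fmin_mem _ hne
  rcases List.mem_map.mp hmem with ⟨x, hx, he⟩
  have := (List.mem_filter.mp hx).2
  simp only [beq_iff_eq] at this
  simp only [selPair]
  rw [← he]; exact this

-- snoc lemmas for the stages
lemma maxLenOf_snoc (p q : String × String) (rest : List (String × String)) :
    maxLenOf p (rest ++ [q]) = max (maxLenOf p rest) q.1.length := by
  unfold maxLenOf; rw [List.foldl_append]; rfl

lemma sel_snoc (p q : String × String) (rest : List (String × String)) :
    selPair p (rest ++ [q]) = pstep (selPair p rest) q := by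
  have hM := maxLenOf_snoc p q rest
  have hblen : (selPair p rest).1.length = maxLenOf p rest := selPair_fst_length p rest
  rcases Nat.lt_trichotomy (maxLenOf p rest) q.1.length with hlt | heq | hgt
  · -- q strictly longer: new longest list is [q], the step takes q
    have hMq : maxLenOf p (rest ++ [q]) = q.1.length := by omega
    have hLong : longestOf p (rest ++ [q]) = [q] := by
      unfold longestOf
      have hsplit : (p :: (rest ++ [q])) = (p :: rest) ++ [q] := by simp
      rw [hsplit, List.filter_append]
      have h1 : (p :: rest).filter (fun x => x.1.length == maxLenOf p (rest ++ [q])) = [] := by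
        apply List.filter_eq_nil_iff.mpr
        intro x hx
        have := maxLenOf_bound p rest x hx
        simp only [hMq, beq_iff_eq]
        omega
      rw [h1, hMq]
      simp
    have hsel : selPair p (rest ++ [q]) = q := by
      simp only [selPair, hLong, List.map_cons, List.map_nil, fmin, List.foldl_nil,
        List.filter_cons, List.filter_nil]
      simp only [beq_self_eq_true, if_true, List.map_cons, List.map_nil]
      rw [show [q.2] = ([] : List String) ++ [q.2] from rfl,
        PySem.List.pyGetD_neg_one_append_singleton]
    rw [hsel]
    simp only [pstep]
    rw [if_pos (by omega)]
  · -- equal length: the longest list gains q at the end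
    have hMe : maxLenOf p (rest ++ [q]) = maxLenOf p rest := by omega
    have hLong : longestOf p (rest ++ [q]) = longestOf p rest ++ [q] := by
      unfold longestOf
      have hsplit : (p :: (rest ++ [q])) = (p :: rest) ++ [q] := by simp
      rw [hsplit, List.filter_append, hMe]
      simp [heq]
    have hbne : (longestOf p rest).map Prod.fst ≠ [] := fun h =>
      longestOf_ne_nil p rest (List.map_eq_nil_iff.mp h)
    obtain ⟨n, ns, hcons⟩ := List.exists_cons_of_ne_nil hbne
    have hb' : fmin ((longestOf p (rest ++ [q])).map Prod.fst)
        = if q.1 < fmin ((longestOf p rest).map Prod.fst)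
          then q.1 else fmin ((longestOf p rest).map Prod.fst) := by
      rw [hLong, List.map_append, hcons, List.map_cons, List.map_nil, List.cons_append]
      have e1 : fmin (n :: (ns ++ [q.1]))
          = (ns ++ [q.1]).foldl (fun m x => if x < m then x else m) n := rfl
      have e2 : fmin (n :: ns) = ns.foldl (fun m x => if x < m then x else m) n := rfl
      rw [e1, e2, List.foldl_append, List.foldl_cons, List.foldl_nil]
    set b := fmin ((longestOf p rest).map Prod.fst) with hbdef
    have hsp : selPair p rest
        = (b, PySem.List.pyGetD (((longestOf p rest).filter (fun x => x.1 == b)).map Prod.snd) (-1) "") := rfl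
    have hblen' : b.length = maxLenOf p rest := hblen
    rcases lt_trichotomy q.1 b with hq | hq | hq
    · -- q.1 < b : q wins
      have hb'' : fmin ((longestOf p (rest ++ [q])).map Prod.fst) = q.1 := by
        rw [hb']; simp [hq]
      have hfilter : (longestOf p (rest ++ [q])).filter (fun x => x.1 == q.1)
          = (longestOf p rest).filter (fun x => x.1 == q.1) ++ [q] := by
        rw [hLong, List.filter_append]; simp
      have hgoal : selPair p (rest ++ [q]) = (q.1, q.2) := by
        simp only [selPair, hb'', hfilter, List.map_append, List.map_cons, List.map_nil]
        rw [PySem.List.pyGetD_neg_one_append_singleton]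
      rw [hgoal, hsp]
      simp only [pstep]
      rw [if_neg (by omega), if_pos ⟨by omega, le_of_lt hq⟩]
    · -- q.1 = b : best unchanged, q is the new last carrier of it
      have hb'' : fmin ((longestOf p (rest ++ [q])).map Prod.fst) = b := by
        rw [hb']; simp [hq]
      have hfilter : (longestOf p (rest ++ [q])).filter (fun x => x.1 == b)
          = (longestOf p rest).filter (fun x => x.1 == b) ++ [q] := by
        rw [hLong, List.filter_append]; simp [hq]
      have hgoal : selPair p (rest ++ [q]) = (b, q.2) := by
        simp only [selPair, hb'', hfilter, List.map_append, List.map_cons, List.map_nil]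
        rw [PySem.List.pyGetD_neg_one_append_singleton]
      rw [hgoal, hsp]
      simp only [pstep]
      rw [if_neg (by omega), if_pos ⟨by omega, le_of_eq hq⟩, ← hq]
    · -- b < q.1 : nothing changes
      have hb'' : fmin ((longestOf p (rest ++ [q])).map Prod.fst) = b := by
        rw [hb']; simp [asymm hq]
      have hne : ¬ ((q.1 == b) = true) := by simp [ne_of_gt hq]
      have hfilter : (longestOf p (rest ++ [q])).filter (fun x => x.1 == b)
          = (longestOf p rest).filter (fun x => x.1 == b) := by
        rw [hLong, List.filter_append]; simp [hne]
      have hgoal : selPair p (rest ++ [q]) = selPair p rest := by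
        rw [hsp]; simp only [selPair, hb'', hfilter]
      rw [hgoal]
      simp only [pstep]
      rw [if_neg (by omega), if_neg (by rintro ⟨-, hle⟩; exact absurd hq (not_lt.mpr hle))]
  · -- q strictly shorter: nothing changes
    have hMe : maxLenOf p (rest ++ [q]) = maxLenOf p rest := by omega
    have hLong : longestOf p (rest ++ [q]) = longestOf p rest := by
      unfold longestOf
      have hsplit : (p :: (rest ++ [q])) = (p :: rest) ++ [q] := by simp
      rw [hsplit, List.filter_append, hMe]
      have hne : q.1.length ≠ maxLenOf p rest := by omega
      simp [hne]
    have hgoal : selPair p (rest ++ [q]) = selPair p rest := by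
      unfold selPair
      rw [hLong]
    rw [hgoal]
    simp only [pstep]
    rw [if_neg (by omega), if_neg (by rintro ⟨he, -⟩; omega)]

lemma fold_eq_sel (rest : List (String × String)) (p : String × String) :
    rest.foldl pstep p = selPair p rest := by
  induction rest using List.reverseRecOn with
  | nil =>
    simp only [List.foldl_nil, selPair, longestOf, maxLenOf, List.foldl_nil,
      List.filter_cons, List.filter_nil, beq_self_eq_true, if_true, List.map_cons,
      List.map_nil, fmin]
    rw [show [p.2] = ([] : List String) ++ [p.2] from rfl,
      PySem.List.pyGetD_neg_one_append_singleton]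
  | append_singleton rest q ih =>
    rw [List.foldl_append, List.foldl_cons, List.foldl_nil, ih, sel_snoc]

-- ===== VERDICT (by name: the statement is the Claim_ definition above) =====
set_option maxHeartbeats 1000000 in
theorem get_longest_name_id_spec : Claim_equal_get_longest_name_id := by
  intro table _ _
  unfold Spec_get_longest_name_id
  cases table with
  | nil => rfl
  | cons r ts =>
    have halt : get_longest_name_id_alt (r :: ts) = (selPair (rowPair r) (ts.map rowPair)).2 := by
      unfold get_longest_name_id_alt selPair longestOf maxLenOf rowPair
      simp only [List.map_cons]
    have ha : get_longest_name_id (r :: ts)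
        = ((ts.map rowPair).foldl pstep (rowPair r)).2 := by
      unfold get_longest_name_id
      rw [List.foldl_cons, aStep_eq_pstep, pstep_init,
        List.foldl_map (f := rowPair) (g := pstep) (l := ts) (init := rowPair r)]
      have hc : ts.foldl aStep (rowPair r)
          = ts.foldl (fun acc row => pstep acc (rowPair row)) (rowPair r) := by
        apply PySem.List.foldl_congr_mem
        intro acc row _
        exact aStep_eq_pstep acc row
      rw [hc]
    rw [ha, halt, fold_eq_sel]
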